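-- pv_equiv track=rewrite | github.com/FalseNegativeLab/mlscorecheck | mlscorecheck/aggregated/_folds.py | stratified_configurations_sklearn
-- ===== SOURCE A (Python) =====
-- def stratified_configurations_sklearn(p, n, n_splits):
--     """
--     The sklearn stratification strategy
--
--     Args:
--         p (int): number of positives
--         n (int): number of negatives
--         n_splits (int): the number of splits
--
--     Returns:
--         list(tuple): the list of the structure of the folds
--     """
--     p_base = p // n_splits
--     n_base = n // n_splits
--     p_remainder = p % n_splits
--     n_remainder = n % n_splits
--
--     results = [(n_base, p_base)] * n_splits
--
--     idx = 0
--     while n_remainder > 0: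
--         results[idx] = (results[idx][0] + 1, results[idx][1])
--         n_remainder -= 1
--         idx += 1
--         idx %= n_splits
--     while p_remainder > 0:
--         results[idx] = (results[idx][0], results[idx][1] + 1)
--         p_remainder -= 1
--         idx += 1
--         idx %= n_splits
--
--     return results
-- ===== SOURCE B (Python) =====
-- def stratified_configurations_sklearn(p, n, n_splits):
--     """
--     The sklearn stratification strategy, computed by direct index arithmetic
--     instead of threading a mutable index through two remainder loops.
--     """
--     p_base, p_rem = divmod(p, n_splits)
--     n_base, n_rem = divmod(n, n_splits)
--     hi = n_rem + p_rem
--     return [(n_base + (1 if i < n_rem else 0),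
--              p_base + (1 if (n_rem <= i < hi or i < hi - n_splits) else 0))
--             for i in range(n_splits)]
-- ===== Notes on version B (the rewrite author's own statement) =====
-- stated objective: simpler
-- what changed: Replaces the two mutable-index remainder loops with a single comprehension computing each fold directly from index arithmetic (negative extras at i < n_rem, positive extras at the wrapped window starting at n_rem).
import Mathlib
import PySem

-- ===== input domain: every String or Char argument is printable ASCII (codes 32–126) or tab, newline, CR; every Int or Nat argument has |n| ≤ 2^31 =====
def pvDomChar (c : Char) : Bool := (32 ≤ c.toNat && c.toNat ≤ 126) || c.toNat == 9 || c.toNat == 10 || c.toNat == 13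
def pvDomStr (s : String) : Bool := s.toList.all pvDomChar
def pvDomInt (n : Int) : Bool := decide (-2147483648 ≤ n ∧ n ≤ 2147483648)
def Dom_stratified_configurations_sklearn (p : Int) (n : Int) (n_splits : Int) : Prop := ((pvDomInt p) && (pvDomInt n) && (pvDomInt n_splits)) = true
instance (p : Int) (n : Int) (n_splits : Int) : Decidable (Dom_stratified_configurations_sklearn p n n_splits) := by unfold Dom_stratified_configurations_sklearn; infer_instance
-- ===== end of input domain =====

-- B computes every fold directly by index arithmetic in one comprehension instead of
-- threading a mutable index through two remainder loops (objective: simpler).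

-- ===== PORT A =====
-- first while loop of A: bump the negative count at idx, advance idx mod n_splits
def scsLoopN (results : List (Int × Int)) (n_remainder : Int) (idx : Int) (n_splits : Int) :
    List (Int × Int) × Int :=
  if h : n_remainder > 0 then
    match PySem.List.pyGet? results idx with
    | some v =>
        scsLoopN (results.set idx.toNat (v.1 + 1, v.2)) (n_remainder - 1)
          (PySem.Int.mod (idx + 1) n_splits) n_splits
    | none => (results, idx)   -- Python would raise IndexError here; unreachable (idx stays in range)
  else (results, idx)
termination_by n_remainder.toNat
decreasing_by omega

-- second while loop of A: bump the positive count at idx, advance idx mod n_splits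
def scsLoopP (results : List (Int × Int)) (p_remainder : Int) (idx : Int) (n_splits : Int) :
    List (Int × Int) × Int :=
  if h : p_remainder > 0 then
    match PySem.List.pyGet? results idx with
    | some v =>
        scsLoopP (results.set idx.toNat (v.1, v.2 + 1)) (p_remainder - 1)
          (PySem.Int.mod (idx + 1) n_splits) n_splits
    | none => (results, idx)   -- Python would raise IndexError here; unreachable (idx stays in range)
  else (results, idx)
termination_by p_remainder.toNat
decreasing_by omega

def stratified_configurations_sklearn (p : Int) (n : Int) (n_splits : Int) : List (Int × Int) :=
  let p_base := PySem.Int.floordiv p n_splits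
  let n_base := PySem.Int.floordiv n n_splits
  let p_remainder := PySem.Int.mod p n_splits
  let n_remainder := PySem.Int.mod n n_splits
  let results := List.replicate n_splits.toNat (n_base, p_base)   -- [x] * n_splits
  let r1 := scsLoopN results n_remainder 0 n_splits
  (scsLoopP r1.1 p_remainder r1.2 n_splits).1

-- ===== PORT B =====
def stratified_configurations_sklearn_alt (p : Int) (n : Int) (n_splits : Int) : List (Int × Int) :=
  let p_base := PySem.Int.floordiv p n_splits
  let p_rem := PySem.Int.mod p n_splits
  let n_base := PySem.Int.floordiv n n_splits
  let n_rem := PySem.Int.mod n n_splits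
  let hi := n_rem + p_rem
  (PySem.List.pyRange 0 n_splits 1).map (fun i =>
    (n_base + (if i < n_rem then (1 : Int) else 0),
     p_base + (if (n_rem ≤ i ∧ i < hi) ∨ i < hi - n_splits then (1 : Int) else 0)))

-- ===== PRECONDITION & SPEC =====
-- A raises ZeroDivisionError iff n_splits = 0; it returns on every other input.
def Pre_stratified_configurations_sklearn (p : Int) (n : Int) (n_splits : Int) : Prop :=
  n_splits ≠ 0
instance (p : Int) (n : Int) (n_splits : Int) : Decidable (Pre_stratified_configurations_sklearn p n n_splits) := by unfold Pre_stratified_configurations_sklearn; infer_instance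

def pvWitness_stratified_configurations_sklearn : Int × Int × Int := (5, 7, 3)

def Spec_stratified_configurations_sklearn (p : Int) (n : Int) (n_splits : Int) (out : List (Int × Int)) : Prop := out = stratified_configurations_sklearn_alt p n n_splits
instance (p : Int) (n : Int) (n_splits : Int) (out : List (Int × Int)) : Decidable (Spec_stratified_configurations_sklearn p n n_splits out) := by unfold Spec_stratified_configurations_sklearn; infer_instance

-- ===== CLAIM (what is proved, stated in full; the proofs are below) =====
def Claim_equal_stratified_configurations_sklearn : Prop := ∀ (p : Int) (n : Int) (n_splits : Int), Dom_stratified_configurations_sklearn p n n_splits → Pre_stratified_configurations_sklearn p n n_splits → Spec_stratified_configurations_sklearn p n n_splits (stratified_configurations_sklearn p n n_splits)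

-- ===== LEMMAS AND PROOFS =====

lemma pymod_small {a k : Int} (h0 : 0 ≤ a) (hk : a < k) : PySem.Int.mod a k = a := by
  rw [PySem.Int.mod_eq_emod_of_pos (by omega)]
  exact Int.emod_eq_of_lt h0 hk

lemma pymod_step {idx k : Int} (h0 : 0 ≤ idx) (hk : idx < k) :
    PySem.Int.mod (idx + 1) k = if idx + 1 = k then 0 else idx + 1 := by
  split_ifs with h
  · rw [h, PySem.Int.mod_eq_emod_of_pos (by omega)]; simp
  · exact pymod_small (by omega) (by omega)

lemma map_range_getD_pair (rs : List (Int × Int)) (m : Nat) (hm : rs.length = m) :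
    (List.range m).map (fun i => rs.getD i (0, 0)) = rs := by
  subst hm
  apply List.ext_getElem
  · simp
  · intro i h1 h2
    simp [List.getD_eq_getElem?_getD, List.getElem?_eq_getElem h2]

lemma scsLoopN_spec (k : Int) (hk : 0 < k) :
    ∀ (fuel : Nat) (rem idx : Int) (rs : List (Int × Int)),
      rem.toNat ≤ fuel → 0 ≤ rem → rem ≤ k → 0 ≤ idx → idx < k →
      rs.length = k.toNat →
      scsLoopN rs rem idx k =
        ((List.range k.toNat).map (fun i =>
          ((rs.getD i (0, 0)).1 +
            (if (idx ≤ (i : Int) ∧ (i : Int) < idx + rem) ∨ (i : Int) < idx + rem - k then 1 else 0),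
           (rs.getD i (0, 0)).2)),
         PySem.Int.mod (idx + rem) k) := by
  intro fuel
  induction fuel with
  | zero =>
    intro rem idx rs hf h0 hrk hi0 hik hlen
    have hrem : rem = 0 := by omega
    subst hrem
    rw [scsLoopN.eq_def]
    simp only [show ¬((0:Int) > 0) by omega, dite_false]
    refine Prod.ext ?_ ?_
    · show rs = _
      rw [List.map_congr_left (g := fun i => rs.getD i (0, 0))
          (fun i hi => by
            rw [if_neg (by omega)]
            simp)]
      exact (map_range_getD_pair rs k.toNat hlen).symm
    · show idx = _
      rw [show idx + 0 = idx by ring, pymod_small hi0 hik]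
  | succ fuel ih =>
    intro rem idx rs hf h0 hrk hi0 hik hlen
    by_cases hrem : rem = 0
    · subst hrem
      rw [scsLoopN.eq_def]
      simp only [show ¬((0:Int) > 0) by omega, dite_false]
      refine Prod.ext ?_ ?_
      · show rs = _
        rw [List.map_congr_left (g := fun i => rs.getD i (0, 0))
            (fun i hi => by
              rw [if_neg (by omega)]
              simp)]
        exact (map_range_getD_pair rs k.toNat hlen).symm
      · show idx = _
        rw [show idx + 0 = idx by ring, pymod_small hi0 hik]
    · have hpos : rem > 0 := by omega
      rw [scsLoopN.eq_def]
      simp only [hpos, dite_true]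
      have hlt : idx < (rs.length : Int) := by rw [hlen]; omega
      rw [PySem.List.pyGet?_eq_some_getElem rs hi0 hlt]
      dsimp only
      have hidx' := pymod_step hi0 hik
      set idx' := PySem.Int.mod (idx + 1) k with hidx'def
      have hi'0 : 0 ≤ idx' := by rw [hidx']; split_ifs <;> omega
      have hi'k : idx' < k := by rw [hidx']; split_ifs <;> omega
      have hlen' : ∀ (x : Int × Int), (rs.set idx.toNat x).length = k.toNat := by
        intro x; simp [hlen]
      rw [ih (rem - 1) idx' _ (by omega) (by omega) (by omega) hi'0 hi'k (hlen' _)]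
      refine Prod.ext ?_ ?_
      · show List.map _ _ = List.map _ _
        apply List.map_congr_left
        intro i hi
        have himem : i < k.toNat := List.mem_range.mp hi
        have hgetset : ∀ (x : Int × Int), (rs.set idx.toNat x).getD i (0, 0) =
            if idx.toNat = i then x else rs.getD i (0, 0) := by
          intro x
          rw [List.getD_eq_getElem?_getD, List.getD_eq_getElem?_getD, List.getElem?_set]
          simp [hlen, himem]
          split_ifs <;> simp_all
        rw [hgetset]
        by_cases hieq : idx.toNat = i
        · subst hieq
          rw [if_pos rfl]
          have hgi : rs.getD idx.toNat (0, 0) = rs[idx.toNat]'(by omega) := by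
            rw [List.getD_eq_getElem?_getD, List.getElem?_eq_getElem (by omega)]
            rfl
          rw [hgi]
          refine Prod.ext ?_ (by rfl)
          show _ + 1 + _ = _ + _
          rw [hidx']
          split_ifs <;> omega
        · rw [if_neg hieq]
          have hne : (i : Int) ≠ idx := by omega
          refine Prod.ext ?_ (by rfl)
          show _ + _ = _ + _
          rw [hidx'] at hi'0 hi'k ⊢
          split_ifs <;> omega
      · show PySem.Int.mod (idx' + (rem - 1)) k = PySem.Int.mod (idx + rem) k
        rw [hidx']
        split_ifs with h2
        · rw [PySem.Int.mod_eq_emod_of_pos hk, PySem.Int.mod_eq_emod_of_pos hk]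
          have h3 : idx + rem = (0 + (rem - 1)) + k := by omega
          rw [h3, Int.add_emod_right]
        · congr 1
          ring

lemma scsLoopP_spec (k : Int) (hk : 0 < k) :
    ∀ (fuel : Nat) (rem idx : Int) (rs : List (Int × Int)),
      rem.toNat ≤ fuel → 0 ≤ rem → rem ≤ k → 0 ≤ idx → idx < k →
      rs.length = k.toNat →
      (scsLoopP rs rem idx k).1 =
        (List.range k.toNat).map (fun i =>
          ((rs.getD i (0, 0)).1,
           (rs.getD i (0, 0)).2 +
            (if (idx ≤ (i : Int) ∧ (i : Int) < idx + rem) ∨ (i : Int) < idx + rem - k then 1 else 0))) := by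
  intro fuel
  induction fuel with
  | zero =>
    intro rem idx rs hf h0 hrk hi0 hik hlen
    have hrem : rem = 0 := by omega
    subst hrem
    rw [scsLoopP.eq_def]
    simp only [show ¬((0:Int) > 0) by omega, dite_false]
    show rs = _
    rw [List.map_congr_left (g := fun i => rs.getD i (0, 0))
        (fun i hi => by
          rw [if_neg (by omega)]
          simp)]
    exact (map_range_getD_pair rs k.toNat hlen).symm
  | succ fuel ih =>
    intro rem idx rs hf h0 hrk hi0 hik hlen
    by_cases hrem : rem = 0
    · subst hrem
      rw [scsLoopP.eq_def]
      simp only [show ¬((0:Int) > 0) by omega, dite_false]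
      show rs = _
      rw [List.map_congr_left (g := fun i => rs.getD i (0, 0))
          (fun i hi => by
            rw [if_neg (by omega)]
            simp)]
      exact (map_range_getD_pair rs k.toNat hlen).symm
    · have hpos : rem > 0 := by omega
      rw [scsLoopP.eq_def]
      simp only [hpos, dite_true]
      have hlt : idx < (rs.length : Int) := by rw [hlen]; omega
      rw [PySem.List.pyGet?_eq_some_getElem rs hi0 hlt]
      dsimp only
      have hidx' := pymod_step hi0 hik
      set idx' := PySem.Int.mod (idx + 1) k with hidx'def
      have hi'0 : 0 ≤ idx' := by rw [hidx']; split_ifs <;> omega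
      have hi'k : idx' < k := by rw [hidx']; split_ifs <;> omega
      have hlen' : ∀ (x : Int × Int), (rs.set idx.toNat x).length = k.toNat := by
        intro x; simp [hlen]
      rw [ih (rem - 1) idx' _ (by omega) (by omega) (by omega) hi'0 hi'k (hlen' _)]
      apply List.map_congr_left
      intro i hi
      have himem : i < k.toNat := List.mem_range.mp hi
      have hgetset : ∀ (x : Int × Int), (rs.set idx.toNat x).getD i (0, 0) =
          if idx.toNat = i then x else rs.getD i (0, 0) := by
        intro x
        rw [List.getD_eq_getElem?_getD, List.getD_eq_getElem?_getD, List.getElem?_set]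
        simp [hlen, himem]
        split_ifs <;> simp_all
      rw [hgetset]
      by_cases hieq : idx.toNat = i
      · subst hieq
        rw [if_pos rfl]
        have hgi : rs.getD idx.toNat (0, 0) = rs[idx.toNat]'(by omega) := by
          rw [List.getD_eq_getElem?_getD, List.getElem?_eq_getElem (by omega)]
          rfl
        rw [hgi]
        refine Prod.ext (by rfl) ?_
        show _ + 1 + _ = _ + _
        rw [hidx']
        split_ifs <;> omega
      · rw [if_neg hieq]
        have hne : (i : Int) ≠ idx := by omega
        refine Prod.ext (by rfl) ?_
        show _ + _ = _ + _
        rw [hidx'] at hi'0 hi'k ⊢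
        split_ifs <;> omega

lemma getD_range_map (f : Nat → Int × Int) (m i : Nat) (hi : i < m) :
    ((List.range m).map f).getD i (0, 0) = f i := by
  rw [List.getD_eq_getElem?_getD, List.getElem?_map, List.getElem?_range hi]
  rfl

-- ===== VERDICT (by name: the statement is the Claim_ definition above) =====
theorem stratified_configurations_sklearn_spec : Claim_equal_stratified_configurations_sklearn := by
  intro p n k _ hpre
  have hk : k ≠ 0 := hpre
  show _ = _
  unfold stratified_configurations_sklearn stratified_configurations_sklearn_alt
  dsimp only
  rcases lt_or_gt_of_ne hk with hneg | hpos
  · -- n_splits < 0: both sides are the empty list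
    have hnr := (PySem.Int.mod_neg_bounds (a := n) (b := k) hneg).2
    have hpr := (PySem.Int.mod_neg_bounds (a := p) (b := k) hneg).2
    rw [scsLoopN.eq_def]
    simp only [show ¬(PySem.Int.mod n k > 0) by omega, dite_false]
    rw [scsLoopP.eq_def]
    simp only [show ¬(PySem.Int.mod p k > 0) by omega, dite_false]
    rw [PySem.List.pyRange_one_eq_nil (by omega)]
    rw [show k.toNat = 0 by omega]
    simp
  · -- n_splits > 0
    have hnr0 := PySem.Int.mod_nonneg (a := n) (b := k) hpos
    have hnrk := PySem.Int.mod_lt (a := n) (b := k) hpos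
    have hpr0 := PySem.Int.mod_nonneg (a := p) (b := k) hpos
    have hprk := PySem.Int.mod_lt (a := p) (b := k) hpos
    rw [scsLoopN_spec k hpos (PySem.Int.mod n k).toNat (PySem.Int.mod n k) 0
        (List.replicate k.toNat (PySem.Int.floordiv n k, PySem.Int.floordiv p k))
        le_rfl hnr0 (by omega) le_rfl hpos (by simp)]
    dsimp only
    rw [zero_add, pymod_small hnr0 hnrk]
    rw [scsLoopP_spec k hpos (PySem.Int.mod p k).toNat (PySem.Int.mod p k) (PySem.Int.mod n k)
        _ le_rfl hpr0 (by omega) hnr0 hnrk (by simp)]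
    rw [PySem.List.pyRange_one, Int.sub_zero, List.map_map]
    apply List.map_congr_left
    intro i hi
    have himem : i < k.toNat := List.mem_range.mp hi
    rw [getD_range_map _ k.toNat i himem]
    have hrep : (List.replicate k.toNat (PySem.Int.floordiv n k, PySem.Int.floordiv p k)).getD i (0, 0)
        = (PySem.Int.floordiv n k, PySem.Int.floordiv p k) := by
      rw [List.getD_eq_getElem?_getD, List.getElem?_replicate]
      simp [himem]
    rw [hrep]
    dsimp only [Function.comp]
    refine Prod.ext ?_ ?_
    · show _ + _ = _ + _
      split_ifs <;> omega
    · show _ + _ = _ + _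
      split_ifs <;> omega
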